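-- pv_equiv track=rewrite | github.com/tannousgeagea/cvision_dl_ops_dev | cvision_ops/utils/data_utils.py | check_annotations_from_raw
-- ===== SOURCE A (Python) =====
-- from typing import List, Dict
--
-- def check_annotations_from_raw(data:List[Dict], task):
--     success = False
--     try:
--         data = [obj for obj in data if 'class_id' in obj.keys()]
--         if not len(data):
--             result = {
--                 'status': 'failed',
--                 'reason': 'could not find class_id in data.objects'
--             }
--             return success, result, data
--
--         if task == 'segmentation':
--             data = [obj for obj in data if 'xyn' in obj.keys()]
--             if not len(data):
--                 result = {
--                     'status': 'failed',
--                     'reason': 'could not find object coordinate [xyn] in data.objects'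
--                 }
--                 return success, result, data
--
--         if task == 'detection':
--             data = [obj for obj in data if 'xyxyn' in obj.keys()]
--             if not len(data):
--                 result = {
--                     'status': 'failed',
--                     'reason': 'could not find object coordinate [xyxyn] in data.objects'
--                 }
--                 return success, result, data
--
--         success = True
--         result = {
--             'status': 'success'
--         }
--
--     except Exception as err:
--         result = {
--             'status': 'failed',
--             'reason': str(err)
--         }
--
--     return success, result, data
-- ===== SOURCE B (Python) =====
-- from typing import List, Dict
--
-- def _validate(data, coord):
--     # Single conjunction filter over all required keys at once; on failure the
--     # surviving list is necessarily empty, and the reason is diagnosed by one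
--     # membership check instead of staged filter passes.
--     required = ['class_id'] + ([coord] if coord is not None else [])
--     kept = [obj for obj in data if all(k in obj.keys() for k in required)]
--     if kept:
--         return True, {'status': 'success'}, kept
--     if coord is not None and any('class_id' in obj.keys() for obj in data):
--         reason = f'could not find object coordinate [{coord}] in data.objects'
--     else:
--         reason = 'could not find class_id in data.objects'
--     return False, {'status': 'failed', 'reason': reason}, []
--
-- def check_annotations_from_raw(data: List[Dict], task):
--     try:
--         return _validate(data, {'segmentation': 'xyn', 'detection': 'xyxyn'}.get(task))
--     except Exception as err:
--         return False, {'status': 'failed', 'reason': str(err)}, data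
-- ===== Notes on version B (the rewrite author's own statement) =====
-- stated objective: simpler
-- what changed: Replaces A's staged filter passes with early returns by one conjunction filter over all required keys plus a single post-hoc membership check that picks the failure reason (the failed list A returns is always empty).
import Mathlib
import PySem

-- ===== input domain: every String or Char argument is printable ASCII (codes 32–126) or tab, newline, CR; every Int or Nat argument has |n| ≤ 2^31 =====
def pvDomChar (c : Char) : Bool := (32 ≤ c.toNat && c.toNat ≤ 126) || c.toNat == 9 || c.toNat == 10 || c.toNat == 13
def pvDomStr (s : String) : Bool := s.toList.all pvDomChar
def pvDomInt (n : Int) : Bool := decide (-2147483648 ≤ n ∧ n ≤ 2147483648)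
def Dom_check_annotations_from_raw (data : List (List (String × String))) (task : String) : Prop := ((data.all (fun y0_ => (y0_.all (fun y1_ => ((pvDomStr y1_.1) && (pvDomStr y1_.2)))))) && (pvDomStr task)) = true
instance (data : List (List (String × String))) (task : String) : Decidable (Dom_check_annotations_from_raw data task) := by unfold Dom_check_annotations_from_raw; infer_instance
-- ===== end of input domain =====

-- B replaces A's staged filter passes (with early failure returns) by one conjunction
-- filter over all required keys plus one membership check picking the failure reason
-- (objective: simpler). Equivalence of the RETURN value; A rebinds its local `data` only.

-- ===== PORT A =====
-- 'key in obj.keys()' = some pair in the assoc list has that key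
def check_annotations_from_raw (data : List (List (String × String))) (task : String) : Bool × (List (String × String)) × (List (List (String × String))) :=
  let success := false
  let data := data.filter (fun obj => obj.any (fun kv => kv.1 == "class_id"))
  if data.length = 0 then
    (success, [("status", "failed"), ("reason", "could not find class_id in data.objects")], data)
  else
    if task == "segmentation" then
      let data := data.filter (fun obj => obj.any (fun kv => kv.1 == "xyn"))
      if data.length = 0 then
        (success, [("status", "failed"), ("reason", "could not find object coordinate [xyn] in data.objects")], data)
      else
        -- task ≠ "detection" here, so A's second task-if does not fire
        (true, [("status", "success")], data)
    else if task == "detection" then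
      let data := data.filter (fun obj => obj.any (fun kv => kv.1 == "xyxyn"))
      if data.length = 0 then
        (success, [("status", "failed"), ("reason", "could not find object coordinate [xyxyn] in data.objects")], data)
      else
        (true, [("status", "success")], data)
    else
      (true, [("status", "success")], data)

-- ===== PORT B =====
-- helper _validate of Source B: one conjunction filter + post-hoc reason diagnosis
def pvValidate (data : List (List (String × String))) (coord : Option String) : Bool × (List (String × String)) × (List (List (String × String))) :=
  let required := ["class_id"] ++ coord.elim [] (fun k => [k])
  let kept := data.filter (fun obj => required.all (fun k => obj.any (fun kv => kv.1 == k)))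
  if kept.isEmpty = false then
    (true, [("status", "success")], kept)
  else
    -- 'coord is not None and any(...)' decomposed over the Option
    let reason :=
      coord.elim "could not find class_id in data.objects" (fun k =>
        if data.any (fun obj => obj.any (fun kv => kv.1 == "class_id")) then
          "could not find object coordinate [" ++ k ++ "] in data.objects"
        else "could not find class_id in data.objects")
    (false, [("status", "failed"), ("reason", reason)], [])

def check_annotations_from_raw_alt (data : List (List (String × String))) (task : String) : Bool × (List (String × String)) × (List (List (String × String))) :=
  -- {'segmentation': 'xyn', 'detection': 'xyxyn'}.get(task)
  pvValidate data
    (if task == "segmentation" then some "xyn"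
     else if task == "detection" then some "xyxyn" else none)

-- ===== PRECONDITION & SPEC =====
def Spec_check_annotations_from_raw (data : List (List (String × String))) (task : String) (out : Bool × (List (String × String)) × (List (List (String × String)))) : Prop := out = check_annotations_from_raw_alt data task
instance (data : List (List (String × String))) (task : String) (out : Bool × (List (String × String)) × (List (List (String × String)))) : Decidable (Spec_check_annotations_from_raw data task out) := by unfold Spec_check_annotations_from_raw; infer_instance

-- ===== CLAIM (what is proved, stated in full; the proofs are below) =====
def Claim_equal_check_annotations_from_raw : Prop := ∀ (data : List (List (String × String))) (task : String), Dom_check_annotations_from_raw data task → Spec_check_annotations_from_raw data task (check_annotations_from_raw data task)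

-- ===== LEMMAS AND PROOFS =====

-- A's staged filter-then-check with early returns equals B's conjunction filter with a
-- post-hoc reason diagnosis, for any first predicate p and second predicate q.
theorem pv_staged_eq_conj {α : Type} (data : List α) (p q : α → Bool)
    (sA sB : String) (rS : List (String × String)) :
    (if (data.filter p).length = 0 then
       ((false : Bool), [("status", "failed"), ("reason", sA)], data.filter p)
     else
       if ((data.filter p).filter q).length = 0 then
         ((false : Bool), [("status", "failed"), ("reason", sB)], (data.filter p).filter q)
       else ((true : Bool), rS, (data.filter p).filter q))
    = (if (data.filter (fun x => p x && (q x && true))).isEmpty = false then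
         ((true : Bool), rS, data.filter (fun x => p x && (q x && true)))
       else
         ((false : Bool),
          [("status", "failed"), ("reason", if data.any p then sB else sA)],
          ([] : List α))) := by
  have hk : data.filter (fun x => p x && (q x && true)) = (data.filter p).filter q := by
    rw [List.filter_filter]
    exact List.filter_congr (fun x _ => by rw [Bool.and_true, Bool.and_comm])
  rw [hk]
  by_cases h1 : data.filter p = []
  · have hany : data.any p = false := by
      rw [List.any_eq_false]
      intro x hx
      simpa using List.filter_eq_nil_iff.mp h1 x hx
    rw [h1]
    simp [hany]
  · have hany : data.any p = true := by
      rcases List.exists_mem_of_ne_nil _ h1 with ⟨x, hx⟩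
      exact List.any_eq_true.mpr ⟨x, List.mem_of_mem_filter hx, List.of_mem_filter hx⟩
    have h1' : ¬(data.filter p).length = 0 := by
      simpa [List.length_eq_zero_iff] using h1
    rw [if_neg h1']
    by_cases h2 : (data.filter p).filter q = []
    · rw [h2]
      simp [hany]
    · have h2' : ¬((data.filter p).filter q).length = 0 := by
        simpa [List.length_eq_zero_iff] using h2
      have h2e : ((data.filter p).filter q).isEmpty = false := by
        simpa using h2
      rw [if_neg h2', if_pos h2e]

-- pvValidate at a literal coord, written in the shape of pv_staged_eq_conj's right-hand side
theorem pvValidate_some (data : List (List (String × String))) (k : String) :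
    pvValidate data (some k)
    = (if (data.filter (fun x => (x.any (fun kv => kv.1 == "class_id")) && ((x.any (fun kv => kv.1 == k)) && true))).isEmpty = false then
         ((true : Bool), [("status", "success")],
          data.filter (fun x => (x.any (fun kv => kv.1 == "class_id")) && ((x.any (fun kv => kv.1 == k)) && true)))
       else
         ((false : Bool),
          [("status", "failed"),
           ("reason", if data.any (fun obj => obj.any (fun kv => kv.1 == "class_id")) then
              "could not find object coordinate [" ++ k ++ "] in data.objects"
            else "could not find class_id in data.objects")],
          ([] : List (List (String × String))))) := rfl

theorem pvValidate_none (data : List (List (String × String))) :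
    pvValidate data none
    = (if (data.filter (fun x => (x.any (fun kv => kv.1 == "class_id")) && true)).isEmpty = false then
         ((true : Bool), [("status", "success")],
          data.filter (fun x => (x.any (fun kv => kv.1 == "class_id")) && true))
       else
         ((false : Bool),
          [("status", "failed"), ("reason", "could not find class_id in data.objects")],
          ([] : List (List (String × String))))) := rfl

-- ===== VERDICT (by name: the statement is the Claim_ definition above) =====
theorem check_annotations_from_raw_spec : Claim_equal_check_annotations_from_raw := by
  intro data task _
  unfold Spec_check_annotations_from_raw check_annotations_from_raw check_annotations_from_raw_alt
  by_cases hs : task == "segmentation"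
  · simpa [hs, pvValidate_some] using
      pv_staged_eq_conj data (fun obj => obj.any (fun kv => kv.1 == "class_id"))
        (fun obj => obj.any (fun kv => kv.1 == "xyn"))
        "could not find class_id in data.objects"
        "could not find object coordinate [xyn] in data.objects"
        [("status", "success")]
  · by_cases hd : task == "detection"
    · simpa [hs, hd, pvValidate_some] using
        pv_staged_eq_conj data (fun obj => obj.any (fun kv => kv.1 == "class_id"))
          (fun obj => obj.any (fun kv => kv.1 == "xyxyn"))
          "could not find class_id in data.objects"
          "could not find object coordinate [xyxyn] in data.objects"
          [("status", "success")]
    · by_cases h1 : data.filter (fun obj => obj.any (fun kv => kv.1 == "class_id")) = []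
      · simp [hs, hd, pvValidate_none, h1]
      · simp [hs, hd, pvValidate_none, List.length_eq_zero_iff, h1]
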